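-- pv_equiv track=rewrite | github.com/wonjun6715/coding_test | 프로그래머스/unrated/181829. 이차원 배열 대각선 순회하기/이차원 배열 대각선 순회하기.py | solution
-- ===== SOURCE A (Python) =====
-- def solution(board, k):
--     answer = 0
--     leng = len(board[0])
--     for i in range(len(board)):
--         for j in range(leng):
--             if i + j <= k:
--                 answer = answer + board[i][j]
--     return answer
-- ===== SOURCE B (Python) =====
-- def solution(board, k):
--     answer = 0
--     leng = len(board[0])
--     rows = len(board)
--     top = min(k, rows + leng - 2)
--     d = 0
--     while d <= top:
--         for i in range(max(0, d - (leng - 1)), min(d, rows - 1) + 1):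
--             answer += board[i][d - i]
--         d += 1
--     return answer
-- ===== Notes on version B (the rewrite author's own statement) =====
-- stated objective: alternative
-- what changed: B iterates over anti-diagonals d = i+j from 0 to min(k, rows+cols-2), summing board[i][d-i] over exactly the in-range rows, instead of A's row-major scan of every cell with an i+j<=k filter.
import Mathlib
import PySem

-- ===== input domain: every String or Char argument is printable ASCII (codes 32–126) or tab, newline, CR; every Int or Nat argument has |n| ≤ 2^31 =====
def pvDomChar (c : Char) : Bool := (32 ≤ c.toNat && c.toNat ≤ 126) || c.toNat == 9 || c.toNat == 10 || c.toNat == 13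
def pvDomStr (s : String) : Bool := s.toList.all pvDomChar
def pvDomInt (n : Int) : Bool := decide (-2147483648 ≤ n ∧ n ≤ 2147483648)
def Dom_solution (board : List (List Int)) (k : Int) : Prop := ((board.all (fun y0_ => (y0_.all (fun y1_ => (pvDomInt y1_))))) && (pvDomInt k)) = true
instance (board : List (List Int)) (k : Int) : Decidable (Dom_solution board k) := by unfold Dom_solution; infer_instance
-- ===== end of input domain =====

-- B replaces A's row-major double loop with an anti-diagonal accumulation touching exactly the
-- included cells (alternative decomposition, same cost); return values agree on Pre_.

-- ===== PORT A =====
-- row-major loop over all cells, adding board[i][j] when i+j <= k.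
-- board[0] raises IndexError on an empty board, and board[i][j] raises on a touched short row:
-- both are excluded by Pre_solution, so the getD defaults are never taken there.
def solution (board : List (List Int)) (k : Int) : Int :=
  let leng := (board.getD 0 []).length
  (List.range board.length).foldl (fun (answer : Int) (i : Nat) =>
    (List.range leng).foldl (fun (answer : Int) (j : Nat) =>
      if (i : Int) + (j : Int) ≤ k then answer + (board.getD i []).getD j 0 else answer) answer) 0

-- ===== PORT B =====
-- 'while d <= top', d starting at 0 and incremented by 1: exactly (top+1).toNat iterations
def solution_alt (board : List (List Int)) (k : Int) : Int :=
  let leng := (board.getD 0 []).length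
  let rows := board.length
  let top : Int := min k ((rows : Int) + (leng : Int) - 2)
  (List.range (top + 1).toNat).foldl (fun (answer : Int) (d : Nat) =>
    (PySem.List.pyRange (max 0 ((d : Int) - ((leng : Int) - 1))) (min (d : Int) ((rows : Int) - 1) + 1) 1).foldl
      (fun (answer : Int) (i : Int) => answer + (board.getD i.toNat []).getD ((d : Int) - i).toNat 0) answer) 0

-- ===== PRECONDITION & SPEC =====
-- Pre_ excludes exactly the inputs where the Python A raises: the empty board (board[0] is an
-- IndexError) and ragged boards where some touched cell (i+j ≤ k, j < len(board[0])) falls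
-- beyond the end of a row shorter than row 0 (board[i][j] IndexError).
def Pre_solution (board : List (List Int)) (k : Int) : Prop :=
  board ≠ [] ∧
  ∀ i < board.length, ∀ j < (board.getD 0 []).length,
    (i : Int) + (j : Int) ≤ k → j < (board.getD i []).length
instance (board : List (List Int)) (k : Int) : Decidable (Pre_solution board k) := by
  unfold Pre_solution; infer_instance
def pvWitness_solution : List (List Int) × Int := ([[1, 2], [3, 4]], 2)
def Spec_solution (board : List (List Int)) (k : Int) (out : Int) : Prop := out = solution_alt board k
instance (board : List (List Int)) (k : Int) (out : Int) : Decidable (Spec_solution board k out) := by unfold Spec_solution; infer_instance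

-- ===== CLAIM (what is proved, stated in full; the proofs are below) =====
def Claim_equal_solution : Prop := ∀ (board : List (List Int)) (k : Int), Dom_solution board k → Pre_solution board k → Spec_solution board k (solution board k)

-- ===== LEMMAS AND PROOFS =====

/-- A fold over `List.range` whose body adds `S i` to the accumulator is the sum of the `S i`. -/
lemma foldl_range_eq_add_sum (f : Int → Nat → Int) (S : Nat → Int)
    (h : ∀ a i, f a i = a + S i) :
    ∀ (n : Nat) (c : Int), (List.range n).foldl f c = c + ∑ x ∈ Finset.range n, S x := by
  intro n
  induction n with
  | zero => simp
  | succ m ih =>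
    intro c
    simp [List.range_succ, Finset.sum_range_succ, ih, h]
    ring

/-- Port A as a double `Finset` sum. -/
lemma solutionA_eq_sum (board : List (List Int)) (k : Int) :
    solution board k =
      ∑ i ∈ Finset.range board.length, ∑ j ∈ Finset.range (board.getD 0 []).length,
        if (i : Int) + (j : Int) ≤ k then (board.getD i []).getD j 0 else 0 := by
  have h0 : solution board k
      = (List.range board.length).foldl (fun (answer : Int) (i : Nat) =>
          (List.range (board.getD 0 []).length).foldl (fun (answer : Int) (j : Nat) =>
            if (i : Int) + (j : Int) ≤ k then answer + (board.getD i []).getD j 0 else answer) answer) 0 := rfl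
  rw [h0]
  rw [foldl_range_eq_add_sum _
    (fun i => ∑ j ∈ Finset.range (board.getD 0 []).length,
      if (i : Int) + (j : Int) ≤ k then (board.getD i []).getD j 0 else 0)
    (fun a i => by
      rw [foldl_range_eq_add_sum _
        (fun j => if (i : Int) + (j : Int) ≤ k then (board.getD i []).getD j 0 else 0)
        (fun a j => by by_cases h : (i : Int) + (j : Int) ≤ k <;> simp [h])])]
  simp

/-- Port B as a sum over anti-diagonals, with Nat bounds. -/
lemma solutionB_eq_sum (board : List (List Int)) (k : Int) :
    solution_alt board k =
      ∑ d ∈ Finset.range (min k ((board.length : Int) + ((board.getD 0 []).length : Int) - 2) + 1).toNat,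
        ∑ i ∈ Finset.Ico (d + 1 - (board.getD 0 []).length) (min d (board.length - 1) + 1),
          (board.getD i []).getD (d - i) 0 := by
  have h0 : solution_alt board k
      = (List.range (min k ((board.length : Int) + ((board.getD 0 []).length : Int) - 2) + 1).toNat).foldl
          (fun (answer : Int) (d : Nat) =>
            (PySem.List.pyRange (max 0 ((d : Int) - (((board.getD 0 []).length : Int) - 1)))
                (min (d : Int) ((board.length : Int) - 1) + 1) 1).foldl
              (fun (answer : Int) (i : Int) =>
                answer + (board.getD i.toNat []).getD ((d : Int) - i).toNat 0) answer) 0 := rfl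
  rw [h0]
  set leng := (board.getD 0 []).length with hleng
  set rows := board.length with hrows
  have hrl : rows = 0 → leng = 0 := by
    rw [hrows, hleng]; intro h; rw [List.length_eq_zero_iff] at h; subst h; rfl
  rw [foldl_range_eq_add_sum _
    (fun d => ∑ i ∈ Finset.Ico (d + 1 - leng) (min d (rows - 1) + 1), (board.getD i []).getD (d - i) 0)
    (fun a d => by
      rw [PySem.List.pyRange_one, List.foldl_map,
        foldl_range_eq_add_sum _
          (fun t => (board.getD (max 0 ((d : Int) - ((leng : Int) - 1)) + (t : Int)).toNat []).getD
            ((d : Int) - (max 0 ((d : Int) - ((leng : Int) - 1)) + (t : Int))).toNat 0)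
          (fun a t => by ring)]
      congr 1
      beta_reduce
      rw [Finset.sum_Ico_eq_sum_range]
      have hcnt : min d (rows - 1) + 1 - (d + 1 - leng)
          = (min (d : Int) ((rows : Int) - 1) + 1 - max 0 ((d : Int) - ((leng : Int) - 1))).toNat := by
        rcases Nat.eq_zero_or_pos rows with h | h
        · have := hrl h; omega
        · omega
      rw [hcnt]
      apply Finset.sum_congr rfl
      intro t ht
      simp only [Finset.mem_range] at ht
      have h1 : (max 0 ((d : Int) - ((leng : Int) - 1)) + (t : Int)).toNat = d + 1 - leng + t := by
        omega
      have h2 : ((d : Int) - (max 0 ((d : Int) - ((leng : Int) - 1)) + (t : Int))).toNat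
          = d - (d + 1 - leng + t) := by
        omega
      rw [h1, h2])]
  simp

/-- The reindexing: summing the rectangle `rows × leng` filtered by `i+j ≤ k` anti-diagonal by
anti-diagonal equals summing it row by row. -/
lemma diag_reindex (b : Nat → Nat → Int) (rows leng : Nat) (k : Int) (hrows : 1 ≤ rows) :
    (∑ d ∈ Finset.range (min k ((rows : Int) + (leng : Int) - 2) + 1).toNat,
        ∑ i ∈ Finset.Ico (d + 1 - leng) (min d (rows - 1) + 1), b i (d - i))
    = ∑ i ∈ Finset.range rows, ∑ j ∈ Finset.range leng,
        if (i : Int) + (j : Int) ≤ k then b i j else 0 := by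
  rw [← Finset.sum_sigma (Finset.range (min k ((rows : Int) + (leng : Int) - 2) + 1).toNat)
      (fun d => Finset.Ico (d + 1 - leng) (min d (rows - 1) + 1)) (fun p => b p.2 (p.1 - p.2))]
  have hR : (∑ i ∈ Finset.range rows, ∑ j ∈ Finset.range leng,
      if (i : Int) + (j : Int) ≤ k then b i j else 0)
      = ∑ p ∈ (Finset.range rows ×ˢ Finset.range leng).filter
          (fun p => (p.1 : Int) + (p.2 : Int) ≤ k), b p.1 p.2 := by
    rw [Finset.sum_filter, Finset.sum_product]
  rw [hR]
  apply Finset.sum_nbij' (i := fun p => (p.2, p.1 - p.2)) (j := fun q => ⟨q.1 + q.2, q.1⟩)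
  · intro p hp
    simp only [Finset.mem_sigma, Finset.mem_range, Finset.mem_Ico] at hp
    simp only [Finset.mem_filter, Finset.mem_product, Finset.mem_range]
    obtain ⟨hd, hlo, hhi⟩ := hp
    refine ⟨⟨by omega, by omega⟩, ?_⟩
    have h1 : (p.2 : Int) + ((p.1 - p.2 : Nat) : Int) = (p.1 : Int) := by omega
    rw [h1]; omega
  · intro q hq
    simp only [Finset.mem_filter, Finset.mem_product, Finset.mem_range] at hq
    simp only [Finset.mem_sigma, Finset.mem_range, Finset.mem_Ico]
    obtain ⟨⟨hi, hj⟩, hk⟩ := hq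
    omega
  · intro p hp
    simp only [Finset.mem_sigma, Finset.mem_range, Finset.mem_Ico] at hp
    obtain ⟨hd, hlo, hhi⟩ := hp
    ext
    · simp; omega
    · simp
  · intro q hq; obtain ⟨a, b⟩ := q; simp
  · intro p hp; rfl

-- ===== VERDICT (by name: the statement is the Claim_ definition above) =====
theorem solution_spec : Claim_equal_solution := by
  intro board k _ hpre
  unfold Spec_solution
  rw [solutionA_eq_sum, solutionB_eq_sum,
    diag_reindex (fun i j => (board.getD i []).getD j 0) board.length (board.getD 0 []).length k
      (by cases board with | nil => exact absurd rfl hpre.1 | cons x xs => simp)]
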